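-- pv_equiv track=rewrite | github.com/Datcoollz/SlitherlinkSATSolver | Solver1/SlitherlinkSatSolver.py | encoding_increment
-- ===== SOURCE A (Python) =====
-- def encoding_increment(clause, clause_size, var_count, index):
--     if index < 0 or index >= clause_size:
--         return False
--     clause[index] += 1
--     valid = True
--     if clause[index] >= var_count - clause_size + index + 1:
--         valid = encoding_increment(clause, clause_size, var_count, index - 1)
--         clause[index] = clause[index - 1] + 1
--     return valid
-- ===== SOURCE B (Python) =====
-- def encoding_increment(clause, clause_size, var_count, index):
--     # Iterative version: downward carry loop, then one forward reset pass.
--     if index < 0 or index >= clause_size: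
--         return False
--     i = index
--     valid = True
--     while True:
--         clause[i] += 1
--         if clause[i] >= var_count - clause_size + i + 1:
--             i -= 1
--             if i < 0:
--                 valid = False
--                 break
--         else:
--             break
--     for j in range(i + 1, index + 1):
--         clause[j] = clause[j - 1] + 1
--     return valid
-- ===== Notes on version B (the rewrite author's own statement) =====
-- stated objective: simpler
-- what changed: Replaced A's recursion-with-unwind (recursive call, then reset on return) by an explicit iterative downward carry loop followed by one forward reset pass over range(i+1, index+1).
import Mathlib
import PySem

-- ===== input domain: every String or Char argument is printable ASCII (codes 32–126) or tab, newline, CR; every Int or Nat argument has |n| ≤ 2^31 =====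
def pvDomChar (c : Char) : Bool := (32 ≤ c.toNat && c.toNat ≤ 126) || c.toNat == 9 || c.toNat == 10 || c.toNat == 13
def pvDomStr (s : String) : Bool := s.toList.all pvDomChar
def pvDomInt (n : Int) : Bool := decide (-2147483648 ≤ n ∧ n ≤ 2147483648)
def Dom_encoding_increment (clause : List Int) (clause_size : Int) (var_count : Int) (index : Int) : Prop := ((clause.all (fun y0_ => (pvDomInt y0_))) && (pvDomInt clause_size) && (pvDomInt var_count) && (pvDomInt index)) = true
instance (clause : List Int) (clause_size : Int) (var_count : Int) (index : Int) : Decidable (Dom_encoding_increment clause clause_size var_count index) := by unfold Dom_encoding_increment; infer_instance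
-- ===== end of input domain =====

-- B replaces A's recursion-with-unwind by an explicit downward carry loop plus one
-- forward reset pass (objective: simpler/iterative decomposition, same cost).
-- Both Pythons mutate `clause` in place identically; the equivalence proved here is
-- about the RETURN value (Bool) only.

-- ===== PORT A =====
-- Recursive helper carrying the mutated list; fuel = index.toNat + 1 is always enough
-- since each call decreases index by 1 and index < 0 returns before the fuel is consumed.
-- List accesses use the total pyGetD/pySetD forms; out-of-range accesses (where the
-- Python raises IndexError) are excluded by Pre_encoding_increment.
def encAux (cs vc : Int) : Nat → Int → List Int → List Int × Bool
  | fuel, index, clause =>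
    if index < 0 ∨ cs ≤ index then (clause, false)
    else
      match fuel with
      | 0 => (clause, false)   -- unreachable with fuel = index.toNat + 1
      | fuel + 1 =>
        let v := PySem.List.pyGetD clause index 0 + 1
        let c1 := PySem.List.pySetD clause index v
        if vc - cs + index + 1 ≤ v then
          let r := encAux cs vc fuel (index - 1) c1
          let c3 := PySem.List.pySetD r.1 index (PySem.List.pyGetD r.1 (index - 1) 0 + 1)
          (c3, r.2)
        else (c1, true)

def encoding_increment (clause : List Int) (clause_size : Int) (var_count : Int) (index : Int) : Bool :=
  (encAux clause_size var_count (index.toNat + 1) index clause).2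

-- ===== PORT B =====
-- The while-loop: returns (clause after the loop, final i, valid).
def altLoop (cs vc : Int) : Nat → Int → List Int → List Int × Int × Bool
  | fuel, i, clause =>
    match fuel with
    | 0 => (clause, i, false)   -- unreachable with fuel = index.toNat + 1
    | fuel + 1 =>
      let v := PySem.List.pyGetD clause i 0 + 1
      let c1 := PySem.List.pySetD clause i v
      if vc - cs + i + 1 ≤ v then
        if i - 1 < 0 then (c1, i - 1, false)
        else altLoop cs vc fuel (i - 1) c1
      else (c1, i, true)

def encoding_increment_alt (clause : List Int) (clause_size : Int) (var_count : Int) (index : Int) : Bool :=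
  if index < 0 ∨ clause_size ≤ index then false
  else
    let r := altLoop clause_size var_count (index.toNat + 1) index clause
    -- forward reset pass (mutates the list only; the returned Bool is r.2.2)
    let _c2 := (PySem.List.pyRange (r.2.1 + 1) (index + 1) 1).foldl
      (fun c j => PySem.List.pySetD c j (PySem.List.pyGetD c (j - 1) 0 + 1)) r.1
    r.2.2

-- ===== PRECONDITION & SPEC =====
-- Pre_ excludes exactly the inputs where the Python A (and B alike) raises IndexError:
-- a valid index (0 ≤ index < clause_size) that is not a position of `clause`.
def Pre_encoding_increment (clause : List Int) (clause_size : Int) (var_count : Int) (index : Int) : Prop :=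
  (0 ≤ index ∧ index < clause_size) → index < (clause.length : Int)
instance (clause : List Int) (clause_size : Int) (var_count : Int) (index : Int) : Decidable (Pre_encoding_increment clause clause_size var_count index) := by unfold Pre_encoding_increment; infer_instance

def pvWitness_encoding_increment : List Int × Int × Int × Int := ([1, 2, 3], 3, 5, 2)

def Spec_encoding_increment (clause : List Int) (clause_size : Int) (var_count : Int) (index : Int) (out : Bool) : Prop := out = encoding_increment_alt clause clause_size var_count index
instance (clause : List Int) (clause_size : Int) (var_count : Int) (index : Int) (out : Bool) : Decidable (Spec_encoding_increment clause clause_size var_count index out) := by unfold Spec_encoding_increment; infer_instance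

-- ===== CLAIM (what is proved, stated in full; the proofs are below) =====
def Claim_equal_encoding_increment : Prop := ∀ (clause : List Int) (clause_size : Int) (var_count : Int) (index : Int), Dom_encoding_increment clause clause_size var_count index → Pre_encoding_increment clause clause_size var_count index → Spec_encoding_increment clause clause_size var_count index (encoding_increment clause clause_size var_count index)

-- ===== LEMMAS AND PROOFS =====

-- The two recursions return the same Bool: A's per-level bounds check and B's
-- explicit `i - 1 < 0` test fire at exactly the same levels.
theorem encAux_snd_eq_altLoop (cs vc : Int) :
    ∀ (fuel : Nat) (i : Int) (clause : List Int), 0 ≤ i → i < cs → i < (fuel : Int) →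
      (encAux cs vc fuel i clause).2 = (altLoop cs vc fuel i clause).2.2 := by
  intro fuel
  induction fuel with
  | zero => intro i clause h0 _ hf; exact absurd hf (by omega)
  | succ fuel ih =>
    intro i clause h0 hcs hf
    rw [encAux.eq_def, altLoop.eq_def]
    simp only [if_neg (show ¬ (i < 0 ∨ cs ≤ i) by omega)]
    by_cases hc : vc - cs + i + 1 ≤ PySem.List.pyGetD clause i 0 + 1
    · simp only [if_pos hc]
      by_cases hi : i - 1 < 0
      · simp only [if_pos hi]
        rw [encAux.eq_def]
        simp only [if_pos (Or.inl hi)]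
      · simp only [if_neg hi]
        exact ih (i - 1) _ (by omega) (by omega) (by omega)
    · simp only [if_neg hc]

-- ===== VERDICT (by name: the statement is the Claim_ definition above) =====
theorem encoding_increment_spec : Claim_equal_encoding_increment := by
  intro clause cs vc index _ _
  unfold Spec_encoding_increment encoding_increment encoding_increment_alt
  by_cases h : index < 0 ∨ cs ≤ index
  · rw [encAux.eq_def]
    simp only [if_pos h]
  · simp only [if_neg h]
    exact encAux_snd_eq_altLoop cs vc (index.toNat + 1) index clause (by omega) (by omega) (by omega)
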